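-- pv_equiv track=rewrite | github.com/hakanovski/MPL | src/modules/occultator.py | map_enochian_coordinates
-- ===== SOURCE A (Python) =====
-- ENOCHIAN_GRID = [
--     ['r', 'Z', 'i', 'l', 'a', 'f', 'A'],
--     ['y', 't', 'l', 'p', 'a', 'e', 'L'],
--     ['o', 'a', 'C', 'V', 'c', 'a', 'u'],
--     ['n', 'i', 'n', 'b', 'Z', 'i', 'x'],
--     ['i', 'a', 's', 'o', 'm', 't', 'P'],
--     ['e', 'x', 'a', 'r', 'p', 'h', 'o'],
--     ['n', 'a', 'n', 't', 'a', 'b', 'M']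
-- ]
--
-- def map_enochian_coordinates(text):
--     """
--     Maps an entity name to specific coordinates on the Great Table.
--     Returns a 'Vector Sum' useful for Support/Resistance lines.
--     """
--     x_sum = 0
--     y_sum = 0
--
--     # Simple hash to map letters to our 7x7 Fractal Grid
--     for char in text.lower():
--         val = ord(char)
--         x = val % 7
--         y = (val * 3) % 7 # Stride of 3
--
--         # Extract power from the grid
--         grid_char = ENOCHIAN_GRID[y][x]
--         x_sum += x
--         y_sum += y
--
--     # The "Vector Path" value
--     vector_power = (x_sum * y_sum) + 49 # Adding the 49 Gate Constant
--     return vector_power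
-- ===== SOURCE B (Python) =====
-- def map_enochian_coordinates(text):
--     """
--     Maps an entity name to specific coordinates on the Great Table.
--     Returns a 'Vector Sum' useful for Support/Resistance lines.
--     """
--     # Frequency table of the lowercased characters, then one pass over the
--     # distinct characters weighted by their counts.  The ENOCHIAN_GRID lookup
--     # of the original is dropped: its value is never used and its indices are
--     # always in range, so it has no observable effect.
--     freq = {}
--     for ch in text.lower():
--         freq[ch] = freq.get(ch, 0) + 1
--
--     x_sum = 0
--     y_sum = 0
--     for ch, n in freq.items():
--         o = ord(ch)
--         x_sum += n * (o % 7)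
--         y_sum += n * ((o * 3) % 7)
--
--     return (x_sum * y_sum) + 49
-- ===== Notes on version B (the rewrite author's own statement) =====
-- stated objective: simpler
-- what changed: B builds a frequency table of the lowercased characters once and sums count-weighted modular coordinates over the distinct characters, dropping the never-used ENOCHIAN_GRID lookup, instead of A's per-character accumulation with a grid read.
import Mathlib
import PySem

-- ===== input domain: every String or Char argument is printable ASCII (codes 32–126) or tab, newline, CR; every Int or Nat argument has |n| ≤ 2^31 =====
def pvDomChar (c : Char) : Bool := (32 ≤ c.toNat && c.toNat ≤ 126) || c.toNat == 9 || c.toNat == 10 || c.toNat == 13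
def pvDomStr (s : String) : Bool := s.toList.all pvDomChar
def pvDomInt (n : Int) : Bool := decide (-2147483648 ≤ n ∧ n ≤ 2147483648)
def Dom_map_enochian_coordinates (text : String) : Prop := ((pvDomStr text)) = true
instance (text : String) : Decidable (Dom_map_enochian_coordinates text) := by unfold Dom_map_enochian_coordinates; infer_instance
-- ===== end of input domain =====

-- B replaces A's per-character accumulation (with an unused grid read) by a count-weighted
-- sum over the distinct lowercased characters: a simpler, genuinely different-shaped pass.

-- ===== PORT A =====
def pvEnochianGrid : List (List Char) :=
  [['r', 'Z', 'i', 'l', 'a', 'f', 'A'],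
   ['y', 't', 'l', 'p', 'a', 'e', 'L'],
   ['o', 'a', 'C', 'V', 'c', 'a', 'u'],
   ['n', 'i', 'n', 'b', 'Z', 'i', 'x'],
   ['i', 'a', 's', 'o', 'm', 't', 'P'],
   ['e', 'x', 'a', 'r', 'p', 'h', 'o'],
   ['n', 'a', 'n', 't', 'a', 'b', 'M']]

def map_enochian_coordinates (text : String) : Int :=
  let sums := (PySem.Str.lower text).toList.foldl
    (fun (p : Int × Int) (ch : Char) =>
      let val : Int := ch.toNat
      let x := PySem.Int.mod val 7
      let y := PySem.Int.mod (val * 3) 7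
      -- grid read: indices are always in 0..6, so the Python lookup never raises;
      -- its value is bound and, as in the Python, never used
      let _grid_char := (PySem.List.pyGet? pvEnochianGrid y).bind
        (fun row => PySem.List.pyGet? row x)
      (p.1 + x, p.2 + y)) (0, 0)
  sums.1 * sums.2 + 49

-- ===== PORT B =====
def map_enochian_coordinates_alt (text : String) : Int :=
  let freq := (PySem.Str.lower text).toList.foldl
    (fun (d : PySem.Dict Char Int) ch => d.insert ch (d.getD ch 0 + 1)) PySem.Dict.empty
  let sums := freq.items.foldl
    (fun (p : Int × Int) (kn : Char × Int) =>
      let o : Int := kn.1.toNat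
      (p.1 + kn.2 * PySem.Int.mod o 7, p.2 + kn.2 * PySem.Int.mod (o * 3) 7)) (0, 0)
  sums.1 * sums.2 + 49

-- ===== PRECONDITION & SPEC =====
def Spec_map_enochian_coordinates (text : String) (out : Int) : Prop := out = map_enochian_coordinates_alt text
instance (text : String) (out : Int) : Decidable (Spec_map_enochian_coordinates text out) := by unfold Spec_map_enochian_coordinates; infer_instance

-- ===== CLAIM (what is proved, stated in full; the proofs are below) =====
def Claim_equal_map_enochian_coordinates : Prop := ∀ (text : String), Dom_map_enochian_coordinates text → Spec_map_enochian_coordinates text (map_enochian_coordinates text)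

-- ===== LEMMAS AND PROOFS =====

-- a pair-fold that adds F and G componentwise is the pair of mapped sums
theorem pvFoldlPairAdd {α : Type} (l : List α) (F G : α → Int) (a b : Int) :
    l.foldl (fun p e => (p.1 + F e, p.2 + G e)) (a, b)
      = (a + (l.map F).sum, b + (l.map G).sum) := by
  induction l generalizing a b with
  | nil => simp
  | cons x xs ih => simp [ih, add_assoc]

theorem pvSumIteMem (ks : List Char) (c : Char) (f : Char → Int)
    (hn : ks.Nodup) (hc : c ∈ ks) :
    (ks.map (fun k => if k = c then f k else 0)).sum = f c := by
  induction ks with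
  | nil => cases hc
  | cons a as ih =>
    rcases List.mem_cons.mp hc with h | h
    · have hnot : ∀ k' ∈ as, ¬ (k' = c) := by
        intro k' hk' he
        exact (List.nodup_cons.mp hn).1 (h ▸ he ▸ hk')
      have hz : (as.map (fun k => if k = c then f k else 0)).sum = 0 := by
        apply List.sum_eq_zero
        intro x hx
        rcases List.mem_map.mp hx with ⟨k', hk', rfl⟩
        simp [hnot k' hk']
      simp [← h, hz]
    · have hac : ¬ (a = c) := by
        intro he; exact (List.nodup_cons.mp hn).1 (he ▸ h)
      simp [hac, ih (List.nodup_cons.mp hn).2 h]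

-- count-weighted sum over a nodup key cover equals the plain mapped sum
theorem pvCountWeightedSum (cs ks : List Char) (f : Char → Int)
    (hn : ks.Nodup) (hcov : ∀ c ∈ cs, c ∈ ks) :
    (ks.map (fun k => (cs.count k : Int) * f k)).sum = (cs.map f).sum := by
  induction cs with
  | nil => simp
  | cons c cs ih =>
    have hcov' : ∀ x ∈ cs, x ∈ ks := fun x hx => hcov x (List.mem_cons_of_mem _ hx)
    have hsplit : ∀ k, (((c :: cs).count k : Int) * f k)
        = (cs.count k : Int) * f k + (if k = c then f k else 0) := by
      intro k
      by_cases h : k = c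
      · simp [h]; ring
      · simp [h, List.count_cons_of_ne (Ne.symm h)]
    calc (ks.map (fun k => ((c :: cs).count k : Int) * f k)).sum
        = (ks.map (fun k => (cs.count k : Int) * f k + (if k = c then f k else 0))).sum := by
          congr 1; exact List.map_congr_left (fun k _ => hsplit k)
      _ = (ks.map (fun k => (cs.count k : Int) * f k)).sum
            + (ks.map (fun k => if k = c then f k else 0)).sum := by
          simp [List.sum_map_add]
      _ = (cs.map f).sum + f c := by
          rw [ih hcov', pvSumIteMem ks c f hn (hcov c List.mem_cons_self)]
      _ = ((c :: cs).map f).sum := by simp [add_comm]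

theorem map_enochian_coordinates_eq (text : String) :
    map_enochian_coordinates text = map_enochian_coordinates_alt text := by
  show
    (let sums := (PySem.Str.lower text).toList.foldl
        (fun (p : Int × Int) (ch : Char) =>
          (p.1 + PySem.Int.mod (ch.toNat : Int) 7,
           p.2 + PySem.Int.mod ((ch.toNat : Int) * 3) 7)) (0, 0)
     sums.1 * sums.2 + 49)
    =
    (let sums := (PySem.Dict.counter (PySem.Str.lower text).toList).items.foldl
        (fun (p : Int × Int) (kn : Char × Int) =>
          (p.1 + kn.2 * PySem.Int.mod (kn.1.toNat : Int) 7,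
           p.2 + kn.2 * PySem.Int.mod ((kn.1.toNat : Int) * 3) 7)) (0, 0)
     sums.1 * sums.2 + 49)
  set cs := (PySem.Str.lower text).toList with hcs
  have hA := pvFoldlPairAdd cs
    (fun ch => PySem.Int.mod (ch.toNat : Int) 7)
    (fun ch => PySem.Int.mod ((ch.toNat : Int) * 3) 7) 0 0
  have hB := pvFoldlPairAdd (PySem.Dict.counter cs).items
    (fun kn : Char × Int => kn.2 * PySem.Int.mod ((kn.1.toNat : Int)) 7)
    (fun kn : Char × Int => kn.2 * PySem.Int.mod ((kn.1.toNat : Int) * 3) 7) 0 0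
  have hwx := pvCountWeightedSum cs (PySem.Set.ofList cs)
    (fun ch => PySem.Int.mod (ch.toNat : Int) 7)
    (PySem.Set.nodup_ofList cs) (fun c hc => (PySem.Set.mem_ofList cs c).mpr hc)
  have hwy := pvCountWeightedSum cs (PySem.Set.ofList cs)
    (fun ch => PySem.Int.mod ((ch.toNat : Int) * 3) 7)
    (PySem.Set.nodup_ofList cs) (fun c hc => (PySem.Set.mem_ofList cs c).mpr hc)
  rw [hA, hB]
  simp only [PySem.Dict.items_counter, List.map_map, Function.comp_def, hwx, hwy, zero_add]

-- ===== VERDICT (by name: the statement is the Claim_ definition above) =====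
theorem map_enochian_coordinates_spec : Claim_equal_map_enochian_coordinates := by
  intro text _
  exact map_enochian_coordinates_eq text
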